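-- pv_equiv track=rewrite | github.com/n4rnjn/Compiler-desigin- | implementation of global data flow analysis/RE-to-NFA Public/RE-to-NFA Public.py | re_to_postfix
-- ===== SOURCE A (Python) =====
-- def re_to_postfix(re_str: str) -> str:
--     concat = []
--     for i, c in enumerate(re_str):
--         if c == " ":
--             continue
--         concat.append(c)
--         if i + 1 >= len(re_str):
--             break
--         next_c = re_str[i + 1]
--         if next_c == " ":
--             continue
--         curr_is_operand = c.isalnum() or c in ")_"
--         next_is_operand = next_c.isalnum() or next_c in "(_"
--         if curr_is_operand and next_is_operand:
--             concat.append(".")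
--         elif c == ")" and next_is_operand:
--             concat.append(".")
--         elif c == "*" and next_is_operand:
--             concat.append(".")
--     expr = "".join(concat)
--
--     precedence = {"|": 1, ".": 2, "*": 3}
--     output = []
--     op_stack = []
--
--     for c in expr:
--         if c.isalnum() or c in "_":
--             output.append(c)
--         elif c == "(":
--             op_stack.append(c)
--         elif c == ")":
--             while op_stack and op_stack[-1] != "(":
--                 output.append(op_stack.pop())
--             if op_stack and op_stack[-1] == "(":
--                 op_stack.pop()
--         elif c in precedence:
--             while op_stack and op_stack[-1] != "(" and precedence.get(op_stack[-1], 0) >= precedence[c]: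
--                 output.append(op_stack.pop())
--             op_stack.append(c)
--
--     while op_stack:
--         output.append(op_stack.pop())
--
--     return "".join(output)
-- ===== SOURCE B (Python) =====
-- def re_to_postfix(re_str: str) -> str:
--     precedence = {"|": 1, ".": 2, "*": 3}
--     output = []
--     op_stack = []
--
--     def shunt(c):
--         if c.isalnum() or c == "_":
--             output.append(c)
--         elif c == "(":
--             op_stack.append(c)
--         elif c == ")":
--             while op_stack and op_stack[-1] != "(":
--                 output.append(op_stack.pop())
--             if op_stack:
--                 op_stack.pop()
--         elif c in precedence:
--             while op_stack and op_stack[-1] != "(" and precedence.get(op_stack[-1], 0) >= precedence[c]: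
--                 output.append(op_stack.pop())
--             op_stack.append(c)
--
--     prev = None  # literal previous character, None after a space (no concat across spaces)
--     for c in re_str:
--         if c == " ":
--             prev = None
--             continue
--         if prev is not None and (prev.isalnum() or prev in ")_*") and (c.isalnum() or c in "(_"):
--             shunt(".")
--         shunt(c)
--         prev = c
--
--     while op_stack:
--         output.append(op_stack.pop())
--     return "".join(output)
-- ===== Notes on version B (the rewrite author's own statement) =====
-- stated objective: simpler
-- what changed: Fused A's two passes into a single left-to-right scan that tracks the literal previous character (reset on spaces) and feeds each token, including the implicit concatenation dot operator, directly into the shunting-yard stack, eliminating the intermediate dotted string.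
import Mathlib
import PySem

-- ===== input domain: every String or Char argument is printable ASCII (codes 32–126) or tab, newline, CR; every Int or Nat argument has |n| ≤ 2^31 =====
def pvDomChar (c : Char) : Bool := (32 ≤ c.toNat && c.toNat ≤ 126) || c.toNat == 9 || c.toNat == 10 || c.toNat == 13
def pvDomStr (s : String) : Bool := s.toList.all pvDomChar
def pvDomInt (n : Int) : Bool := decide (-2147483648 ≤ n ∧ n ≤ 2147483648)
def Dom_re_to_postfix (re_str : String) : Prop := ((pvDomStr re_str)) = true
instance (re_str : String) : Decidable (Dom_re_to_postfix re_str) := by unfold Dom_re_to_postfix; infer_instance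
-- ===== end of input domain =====

-- B fuses A's two passes (build dotted string, then shunting-yard) into one scan that
-- tracks the previous character and feeds tokens straight into the operator stack.

-- ===== PORT A =====

-- Python's c.isalnum() on the ASCII domain (exact there).
def pyIsAlnum (c : Char) : Bool := c.isAlpha || c.isDigit

-- precedence.get(c, 0)
def precOf (c : Char) : Nat := if c = '|' then 1 else if c = '.' then 2 else if c = '*' then 3 else 0

-- A's first pass: the `concat` list (skip spaces, insert '.' by the lookahead rules;
-- the loop `break`s when there is no next character).
def concatA : List Char → List Char
  | [] => []
  | [c] => if c = ' ' then [] else [c]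
  | c :: next :: rest =>
    if c = ' ' then concatA (next :: rest)
    else if next = ' ' then c :: concatA (next :: rest)
    else
      -- curr_is_operand / next_is_operand and the three elif branches of A
      let currOp := pyIsAlnum c || c = ')' || c = '_'
      let nextOp := pyIsAlnum next || next = '(' || next = '_'
      if (currOp && nextOp) || (c = ')' && nextOp) || (c = '*' && nextOp) then
        c :: '.' :: concatA (next :: rest)
      else c :: concatA (next :: rest)

-- `while op_stack and op_stack[-1] != "(": output.append(op_stack.pop())`
-- returns (chars appended to output, remaining stack); the stack top is the list head.
def popToParen : List Char → List Char × List Char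
  | [] => ([], [])
  | t :: rest => if t = '(' then ([], t :: rest)
                 else let (o, s) := popToParen rest; (t :: o, s)

-- `while op_stack and op_stack[-1] != "(" and precedence.get(op_stack[-1],0) >= precedence[c]: …`
def popGe (p : Nat) : List Char → List Char × List Char
  | [] => ([], [])
  | t :: rest => if t = '(' then ([], t :: rest)
                 else if p ≤ precOf t then let (o, s) := popGe p rest; (t :: o, s)
                 else ([], t :: rest)

-- the body of A's second loop: state = (output, op_stack)
def syStep (st : List Char × List Char) (c : Char) : List Char × List Char :=
  let (out, stk) := st
  if pyIsAlnum c || c = '_' then (out ++ [c], stk)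
  else if c = '(' then (out, c :: stk)
  else if c = ')' then
    let (o, s) := popToParen stk
    match s with
    | t :: s' => if t = '(' then (out ++ o, s') else (out ++ o, s)
    | [] => (out ++ o, [])
  else if c = '|' ∨ c = '.' ∨ c = '*' then
    let (o, s) := popGe (precOf c) stk
    (out ++ o, c :: s)
  else st

def re_to_postfix (re_str : String) : String :=
  let expr := concatA re_str.toList
  let (out, stk) := expr.foldl syStep ([], [])
  String.ofList (out ++ stk)      -- final `while op_stack: output.append(op_stack.pop())`

-- ===== PORT B =====

-- Source B's concatenation test on (previous char, current char)
def dotCondB (p c : Char) : Bool :=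
  (pyIsAlnum p || p = ')' || p = '_' || p = '*') && (pyIsAlnum c || c = '(' || c = '_')

-- Source B's single scan: state = (output, op_stack), prev = literal previous char (none after a space)
def loopB : List Char → Option Char → List Char × List Char → List Char × List Char
  | [], _, st => st
  | c :: rest, prev, st =>
    if c = ' ' then loopB rest none st
    else
      let st1 := match prev with
        | some p => if dotCondB p c then syStep st '.' else st
        | none => st
      loopB rest (some c) (syStep st1 c)

def re_to_postfix_alt (re_str : String) : String :=
  let (out, stk) := loopB re_str.toList none ([], [])
  String.ofList (out ++ stk)

-- ===== PRECONDITION & SPEC =====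
def Spec_re_to_postfix (re_str : String) (out : String) : Prop := out = re_to_postfix_alt re_str
instance (re_str : String) (out : String) : Decidable (Spec_re_to_postfix re_str out) := by unfold Spec_re_to_postfix; infer_instance

-- ===== CLAIM (what is proved, stated in full; the proofs are below) =====
def Claim_equal_re_to_postfix : Prop := ∀ (re_str : String), Dom_re_to_postfix re_str → Spec_re_to_postfix re_str (re_to_postfix re_str)

-- ===== LEMMAS AND PROOFS =====

-- the token stream B processes, as a list (dot inserted before the current char)
def tokensB : List Char → Option Char → List Char
  | [], _ => []
  | c :: rest, prev =>
    if c = ' ' then tokensB rest none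
    else
      (match prev with
       | some p => if dotCondB p c then ['.'] else []
       | none => []) ++ c :: tokensB rest (some c)

lemma loopB_eq_foldl (l : List Char) : ∀ (prev : Option Char) (st : List Char × List Char),
    loopB l prev st = (tokensB l prev).foldl syStep st := by
  induction l with
  | nil => intro prev st; simp [loopB, tokensB]
  | cons c rest ih =>
    intro prev st
    by_cases hc : c = ' '
    · simp [loopB, tokensB, hc, ih]
    · cases prev with
      | none => simp [loopB, tokensB, hc, ih]
      | some p =>
        by_cases hd : dotCondB p c <;>
          simp [loopB, tokensB, hc, hd, ih]

lemma concatA_space (rest : List Char) : concatA (' ' :: rest) = concatA rest := by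
  cases rest <;> simp [concatA]

lemma tokensB_eq_concatA (l : List Char) :
    tokensB l none = concatA l ∧
    ∀ c : Char, c ≠ ' ' → c :: tokensB l (some c) = concatA (c :: l) := by
  induction l with
  | nil =>
    refine ⟨rfl, ?_⟩
    intro c hc; simp [tokensB, concatA, hc]
  | cons x xs ih =>
    constructor
    · by_cases hx : x = ' '
      · subst hx; simpa [tokensB, concatA_space] using ih.1
      · simpa [tokensB, hx] using ih.2 x hx
    · intro c hc
      by_cases hx : x = ' '
      · subst hx
        simp only [tokensB, concatA, if_neg hc]
        exact congrArg (c :: ·) (by simpa [concatA_space] using ih.1)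
      · have hrec : x :: tokensB xs (some x) = concatA (x :: xs) := ih.2 x hx
        by_cases hd : dotCondB c x
        · have hd' : (((pyIsAlnum c || c = ')' || c = '_') &&
              (pyIsAlnum x || x = '(' || x = '_')) ||
              (c = ')' && (pyIsAlnum x || x = '(' || x = '_')) ||
              (c = '*' && (pyIsAlnum x || x = '(' || x = '_'))) = true := by
            revert hd; unfold dotCondB
            cases pyIsAlnum c <;> cases pyIsAlnum x <;>
              by_cases h1 : c = ')' <;> by_cases h2 : c = '_' <;> by_cases h3 : c = '*' <;>
              by_cases h4 : x = '(' <;> by_cases h5 : x = '_' <;> simp [h1, h2, h3, h4, h5]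
          simp [tokensB, concatA, hc, hx, hd, hd', ← hrec]
        · have hd' : ¬ ((((pyIsAlnum c || c = ')' || c = '_') &&
              (pyIsAlnum x || x = '(' || x = '_')) ||
              (c = ')' && (pyIsAlnum x || x = '(' || x = '_')) ||
              (c = '*' && (pyIsAlnum x || x = '(' || x = '_'))) = true) := by
            revert hd; unfold dotCondB
            cases pyIsAlnum c <;> cases pyIsAlnum x <;>
              by_cases h1 : c = ')' <;> by_cases h2 : c = '_' <;> by_cases h3 : c = '*' <;>
              by_cases h4 : x = '(' <;> by_cases h5 : x = '_' <;> simp [h1, h2, h3, h4, h5]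
          simp [tokensB, concatA, hc, hx, hd, hd', ← hrec]

-- ===== VERDICT (by name: the statement is the Claim_ definition above) =====
theorem re_to_postfix_spec : Claim_equal_re_to_postfix := by
  intro s _
  unfold Spec_re_to_postfix re_to_postfix re_to_postfix_alt
  rw [loopB_eq_foldl, (tokensB_eq_concatA s.toList).1]
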